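-- pv_equiv track=rewrite | github.com/elw1s/CSE321-IntroductionToAlgorithm | HW4/worst_best_1901042648.py | worst_best
-- ===== SOURCE A (Python) =====
-- def worst_best(success_rates, start , end):
--     maxL = success_rates[start]
--     maxR = success_rates[start]
--     minL = success_rates[start]
--     minR = success_rates[start]
--
--     if start == end:
--         return maxL, minL , start , start
--     elif start - end == 1:
--         if success_rates[start] > success_rates[end]:
--             minL = success_rates[end]
--             return maxL , minL , start , end
--         else:
--             maxL = success_rates[end]
--             return maxL , minL , end , start
--     else:
--         mid = int((start + end) / 2)
--         maxL , minL , maxIndexL , minIndexL = worst_best(success_rates, start , mid)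
--         maxR , minR , maxIndexR , minIndexR = worst_best(success_rates, mid + 1 , end)
--         return maxL if maxL >= maxR else maxR , minL if minL <= minR else minR , maxIndexL if maxL >= maxR else maxIndexR , minIndexL if minL <= minR else minIndexR
-- ===== SOURCE B (Python) =====
-- def worst_best(success_rates, start, end):
--     maxV = minV = success_rates[start]
--     maxI = minI = start
--     for i in range(start + 1, end + 1):
--         v = success_rates[i]
--         if v > maxV:
--             maxV, maxI = v, i
--         if v < minV:
--             minV, minI = v, i
--     return maxV, minV, maxI, minI
-- ===== Notes on version B (the rewrite author's own statement) =====
-- stated objective: simpler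
-- what changed: Replaces the divide-and-conquer recursion (with its left-biased >=/<= merges) by a single iterative left-to-right scan keeping the current max/min and their first indices via strict comparisons.
-- outside the precondition, e.g. on worst_best([3, 5], 1, 0): A returns (5, 3, 1, 0), B returns (5, 5, 1, 1); on worst_best([3, 5], -1, -1): A returns (5, 5, -1, -1), B returns (5, 5, -1, -1)
import Mathlib
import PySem

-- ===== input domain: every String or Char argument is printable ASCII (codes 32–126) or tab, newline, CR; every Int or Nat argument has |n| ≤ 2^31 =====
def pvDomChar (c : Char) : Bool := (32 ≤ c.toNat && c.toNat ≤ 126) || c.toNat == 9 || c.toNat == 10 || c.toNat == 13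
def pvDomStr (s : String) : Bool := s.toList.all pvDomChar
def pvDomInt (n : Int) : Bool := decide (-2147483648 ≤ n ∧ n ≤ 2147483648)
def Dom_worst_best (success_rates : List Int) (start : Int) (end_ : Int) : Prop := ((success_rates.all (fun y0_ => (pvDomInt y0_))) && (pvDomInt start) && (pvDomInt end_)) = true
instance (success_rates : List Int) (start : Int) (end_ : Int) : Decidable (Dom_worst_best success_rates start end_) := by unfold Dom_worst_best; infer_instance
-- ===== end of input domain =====

-- B replaces A's divide-and-conquer recursion by one iterative scan keeping the running
-- max/min and their first indices (objective: simpler).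

-- ===== PORT A =====
-- Literal port of A's recursion; a fuel parameter only makes the same computation total
-- (inside Pre_ the fuel never runs out — see worst_best_go_eq_alt below).
-- Python's 'int((start + end) / 2)' truncates toward zero: PySem.Int.truncdiv (exact on Dom, |n| ≤ 2^31 < 2^53).
def worst_best_go (s : List Int) : Nat → Int → Int → Int × Int × Int × Int
  | 0, _, _ => (0, 0, 0, 0)
  | Nat.succ f, start, end_ =>
    let v := PySem.List.pyGetD s start 0
    if start = end_ then (v, v, start, start)
    else if start - end_ = 1 then
      let ve := PySem.List.pyGetD s end_ 0
      if v > ve then (v, ve, start, end_) else (ve, v, end_, start)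
    else
      let mid := PySem.Int.truncdiv (start + end_) 2
      let L := worst_best_go s f start mid
      let R := worst_best_go s f (mid + 1) end_
      ((if L.1 ≥ R.1 then L.1 else R.1),
       (if L.2.1 ≤ R.2.1 then L.2.1 else R.2.1),
       (if L.1 ≥ R.1 then L.2.2.1 else R.2.2.1),
       (if L.2.1 ≤ R.2.1 then L.2.2.2 else R.2.2.2))

def worst_best (success_rates : List Int) (start : Int) (end_ : Int) : Int × Int × Int × Int :=
  worst_best_go success_rates ((end_ - start).toNat + 1) start end_

-- ===== PORT B =====
-- loop body of Source B: update (maxV, minV, maxI, minI) with element at index i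
def wbStep (s : List Int) (st : Int × Int × Int × Int) (i : Int) : Int × Int × Int × Int :=
  let v := PySem.List.pyGetD s i 0
  let m := if v > st.1 then (v, i) else (st.1, st.2.2.1)
  let n := if v < st.2.1 then (v, i) else (st.2.1, st.2.2.2)
  (m.1, n.1, m.2, n.2)

def worst_best_alt (success_rates : List Int) (start : Int) (end_ : Int) : Int × Int × Int × Int :=
  let v0 := PySem.List.pyGetD success_rates start 0
  (PySem.List.pyRange (start + 1) (end_ + 1) 1).foldl (wbStep success_rates) (v0, v0, start, start)

-- ===== PRECONDITION & SPEC =====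
-- Pre_ excludes calls with start > end_ or negative/out-of-range indices: there the 'subarray
-- [start..end]' is empty or ill-formed — A either raises (IndexError; RecursionError on most
-- reversed ranges) or, on the start = end + 1 and negative start = end corners, returns an
-- accidental value of its elif branch that no caller of a subarray max/min would specify.
def Pre_worst_best (success_rates : List Int) (start : Int) (end_ : Int) : Prop :=
  0 ≤ start ∧ start ≤ end_ ∧ end_ < success_rates.length

instance (success_rates : List Int) (start : Int) (end_ : Int) : Decidable (Pre_worst_best success_rates start end_) := by unfold Pre_worst_best; infer_instance

def pvWitness_worst_best : List Int × Int × Int := ([4, -2, 7, 7, -2], 1, 4)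

def Spec_worst_best (success_rates : List Int) (start : Int) (end_ : Int) (out : Int × Int × Int × Int) : Prop := out = worst_best_alt success_rates start end_
instance (success_rates : List Int) (start : Int) (end_ : Int) (out : Int × Int × Int × Int) : Decidable (Spec_worst_best success_rates start end_ out) := by unfold Spec_worst_best; infer_instance

-- ===== CLAIM (what is proved, stated in full; the proofs are below) =====
def Claim_equal_worst_best : Prop := ∀ (success_rates : List Int) (start : Int) (end_ : Int), Dom_worst_best success_rates start end_ → Pre_worst_best success_rates start end_ → Spec_worst_best success_rates start end_ (worst_best success_rates start end_)

-- ===== LEMMAS AND PROOFS =====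

-- A's left-biased merge of two (max, min, maxIdx, minIdx) tuples
def wbCombine (L R : Int × Int × Int × Int) : Int × Int × Int × Int :=
  ((if L.1 ≥ R.1 then L.1 else R.1),
   (if L.2.1 ≤ R.2.1 then L.2.1 else R.2.1),
   (if L.1 ≥ R.1 then L.2.2.1 else R.2.2.1),
   (if L.2.1 ≤ R.2.1 then L.2.2.2 else R.2.2.2))

theorem wbStep_eq_combine_init (s : List Int) (L : Int × Int × Int × Int) (i : Int) :
    wbStep s L i = wbCombine L (PySem.List.pyGetD s i 0, PySem.List.pyGetD s i 0, i, i) := by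
  simp only [wbStep, wbCombine]
  split_ifs <;> simp_all <;> omega

theorem wbStep_combine (s : List Int) (L R : Int × Int × Int × Int) (i : Int) :
    wbStep s (wbCombine L R) i = wbCombine L (wbStep s R i) := by
  simp only [wbStep, wbCombine]
  split_ifs <;> simp_all <;> omega

theorem foldl_wbStep_combine (s : List Int) (l : List Int) :
    ∀ (L R : Int × Int × Int × Int),
      l.foldl (wbStep s) (wbCombine L R) = wbCombine L (l.foldl (wbStep s) R) := by
  induction l with
  | nil => intro L R; rfl
  | cons i t ih => intro L R; simp only [List.foldl_cons, wbStep_combine, ih]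

theorem alt_single (s : List Int) (start : Int) :
    worst_best_alt s start start =
      (PySem.List.pyGetD s start 0, PySem.List.pyGetD s start 0, start, start) := by
  simp only [worst_best_alt]
  rw [PySem.List.pyRange_one_eq_nil (by omega)]
  rfl

theorem alt_split (s : List Int) (start mid end_ : Int)
    (h1 : start ≤ mid) (h2 : mid < end_) :
    worst_best_alt s start end_ =
      wbCombine (worst_best_alt s start mid) (worst_best_alt s (mid + 1) end_) := by
  simp only [worst_best_alt]
  rw [PySem.List.pyRange_one_append (start + 1) (mid + 1) (end_ + 1) (by omega) (by omega),
      List.foldl_append,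
      PySem.List.pyRange_one_cons (show mid + 1 < end_ + 1 by omega),
      List.foldl_cons, wbStep_eq_combine_init, foldl_wbStep_combine]

theorem mid_bounds (lo hi : Int) (h0 : 0 ≤ lo) (h : lo < hi) :
    lo ≤ PySem.Int.truncdiv (lo + hi) 2 ∧ PySem.Int.truncdiv (lo + hi) 2 < hi := by
  have : PySem.Int.truncdiv (lo + hi) 2 = (lo + hi).tdiv 2 := rfl
  rw [this, Int.tdiv_eq_ediv_of_nonneg (by omega)]
  omega

theorem worst_best_go_eq_alt (s : List Int) :
    ∀ (fuel : Nat) (start end_ : Int), 0 ≤ start → start ≤ end_ →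
      (end_ - start).toNat < fuel →
      worst_best_go s fuel start end_ = worst_best_alt s start end_ := by
  intro fuel
  induction fuel with
  | zero => intro _ _ _ _ h; omega
  | succ f ih =>
    intro start end_ h0 hle hf
    by_cases heq : start = end_
    · subst heq
      simp only [worst_best_go, alt_single, if_true]
    · have hlt : start < end_ := lt_of_le_of_ne hle heq
      have hne : ¬ start - end_ = 1 := by omega
      have hmid := mid_bounds start end_ h0 hlt
      simp only [worst_best_go, if_neg heq, if_neg hne]
      rw [ih start (PySem.Int.truncdiv (start + end_) 2) h0 hmid.1 (by omega),
          ih (PySem.Int.truncdiv (start + end_) 2 + 1) end_ (by omega) (by omega) (by omega),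
          alt_split s start (PySem.Int.truncdiv (start + end_) 2) end_ hmid.1 hmid.2]
      rfl

-- ===== VERDICT (by name: the statement is the Claim_ definition above) =====
theorem worst_best_spec : Claim_equal_worst_best := by
  intro s start end_ _ hpre
  unfold Spec_worst_best worst_best
  exact worst_best_go_eq_alt s _ start end_ hpre.1 hpre.2.1 (by omega)
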